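-- pv_equiv track=rewrite | github.com/christopher-burke/warmups | python/misc/complete_the_word.py | can_complete
-- ===== SOURCE A (Python) =====
-- from itertools import zip_longest
--
-- def can_complete(input_: str, word: str) -> bool:
--     """Determine if word can be completed from input_."""
--     input_ordered = enumerate(input_)
--     letter_check = [letter
--                     for start_index, letter in input_ordered
--                     if letter in word[start_index:]]
--     order_check = []
--     input_list = list(input_)
--
--     for letter in word:
--         if letter in input_list:
--             order_check.append(letter)
--             input_list.pop(input_list.index(letter))
--
--     return all([i[0] == i[1] and j[0] == j[1]
--                 # Check letters from input_ match word.
--                 for i in zip_longest(input_, letter_check)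
--                 # Check the order of input_.
--                 for j in zip_longest(input_, order_check)
--                 ])
-- ===== SOURCE B (Python) =====
-- def can_complete(input_: str, word: str) -> bool:
--     """Determine if word can be completed from input_."""
--     # last occurrence index of each letter in word
--     last = {}
--     for j, c in enumerate(word):
--         last[c] = j
--     # every letter of input_ must still occur in word at or after its index
--     for i, c in enumerate(input_):
--         if last.get(c, -1) < i:
--             return False
--     # greedy scan of word against a multiset of input_'s letters must
--     # reproduce input_ exactly, in order
--     cnt = {}
--     for c in input_:
--         cnt[c] = cnt.get(c, 0) + 1
--     k = 0
--     for c in word: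
--         if cnt.get(c, 0) > 0:
--             cnt[c] = cnt[c] - 1
--             if k >= len(input_) or input_[k] != c:
--                 return False
--             k += 1
--     return k == len(input_)
-- ===== Notes on version B (the rewrite author's own statement) =====
-- stated objective: faster
-- what changed: Replaces A's Cartesian-product of zip_longest checks and repeated list.index/pop removals by a precomputed last-occurrence dict plus a single greedy counter scan with an index pointer, two linear passes instead of quadratic work.
import Mathlib
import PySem

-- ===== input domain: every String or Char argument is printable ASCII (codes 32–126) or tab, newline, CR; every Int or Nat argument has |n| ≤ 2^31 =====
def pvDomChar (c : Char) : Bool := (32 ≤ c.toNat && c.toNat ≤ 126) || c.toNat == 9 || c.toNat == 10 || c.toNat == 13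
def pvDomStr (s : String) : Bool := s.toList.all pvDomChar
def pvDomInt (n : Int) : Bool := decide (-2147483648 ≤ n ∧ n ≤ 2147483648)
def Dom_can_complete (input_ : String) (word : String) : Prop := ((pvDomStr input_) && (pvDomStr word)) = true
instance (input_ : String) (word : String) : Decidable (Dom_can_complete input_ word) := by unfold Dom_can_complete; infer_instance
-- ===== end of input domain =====

-- B replaces A's Cartesian-product zip_longest check and repeated list.index/pop
-- removals by a last-occurrence dict and one greedy counter scan (linear passes).

-- ===== PORT A =====

-- itertools.zip_longest (fillvalue=None) on two char sequences
def zipLongest : List Char → List Char → List (Option Char × Option Char)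
  | [], [] => []
  | x :: xs, [] => (some x, none) :: zipLongest xs []
  | [], y :: ys => (none, some y) :: zipLongest [] ys
  | x :: xs, y :: ys => (some x, some y) :: zipLongest xs ys

-- the body of A's 'for letter in word' loop: state (order_check, input_list)
def aOrderStep (st : List Char × List Char) (letter : Char) : List Char × List Char :=
  if st.2.contains letter then
    match PySem.List.pop? st.2 ((PySem.List.index? st.2 letter).getD 0 : Int) with
    | some r => (st.1 ++ [letter], r.2)
    | none => st
  else st

def can_complete (input_ : String) (word : String) : Bool :=
  let L := input_.toList
  let letter_check : List Char :=
    ((PySem.List.enumerate L 0).filter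
      (fun p => PySem.Chars.isIn [p.2] (PySem.List.slice word.toList (some p.1) none))).map (·.2)
  let order_check : List Char := (word.toList.foldl aOrderStep ([], L)).1
  (zipLongest L letter_check).all (fun i =>
    (zipLongest L order_check).all (fun j => (i.1 == i.2) && (j.1 == j.2)))

-- ===== PORT B =====

-- 'for i, c in enumerate(input_): if last.get(c, -1) < i: return False'
def altLetterLoop (last : PySem.Dict Char Int) : List (Int × Char) → Bool
  | [] => true
  | p :: rest => if last.getD p.2 (-1) < p.1 then false else altLetterLoop last rest

-- 'for c in word: …' greedy scan with counter cnt and pointer k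
def altOrderLoop (L : List Char) : List Char → PySem.Dict Char Int → Nat → Bool
  | [], _, k => k == L.length
  | c :: rest, cnt, k =>
    if cnt.getD c 0 > 0 then
      let cnt' := cnt.insert c (cnt.getD c 0 - 1)
      if k ≥ L.length || (PySem.List.pyGet? L (k : Int) != some c) then false
      else altOrderLoop L rest cnt' (k + 1)
    else altOrderLoop L rest cnt k

def can_complete_alt (input_ : String) (word : String) : Bool :=
  let L := input_.toList
  let W := word.toList
  let last := (PySem.List.enumerate W 0).foldl (fun d p => d.insert p.2 p.1) PySem.Dict.empty
  let cnt := L.foldl (fun d c => d.insert c (d.getD c 0 + 1)) PySem.Dict.empty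
  altLetterLoop last (PySem.List.enumerate L 0) && altOrderLoop L W cnt 0

-- ===== PRECONDITION & SPEC =====
def Spec_can_complete (input_ : String) (word : String) (out : Bool) : Prop := out = can_complete_alt input_ word
instance (input_ : String) (word : String) (out : Bool) : Decidable (Spec_can_complete input_ word out) := by unfold Spec_can_complete; infer_instance

-- ===== CLAIM (what is proved, stated in full; the proofs are below) =====
def Claim_equal_can_complete : Prop := ∀ (input_ : String) (word : String), Dom_can_complete input_ word → Spec_can_complete input_ word (can_complete input_ word)

-- ===== LEMMAS AND PROOFS =====

-- ---- zip_longest facts ----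
theorem zl_ne_nil (xs ys : List Char) (h : xs ≠ []) : zipLongest xs ys ≠ [] := by
  cases xs with
  | nil => exact absurd rfl h
  | cons x xs => cases ys <;> simp [zipLongest]

theorem zl_all (xs ys : List Char) :
    ((zipLongest xs ys).all (fun p => p.1 == p.2) = true) ↔ xs = ys := by
  induction xs generalizing ys with
  | nil => cases ys <;> simp [zipLongest]
  | cons x xs ih => cases ys with
    | nil => simp [zipLongest]
    | cons y ys => simp [zipLongest, ih]

theorem prodAll (Z1 Z2 : List (Option Char × Option Char)) (h1 : Z1 ≠ []) (h2 : Z2 ≠ []) :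
    (Z1.all (fun i => Z2.all (fun j => (i.1 == i.2) && (j.1 == j.2))) = true) ↔
      (Z1.all (fun p => p.1 == p.2) = true ∧ Z2.all (fun p => p.1 == p.2) = true) := by
  cases Z1 with
  | nil => exact absurd rfl h1
  | cons a Z1' => cases Z2 with
    | nil => exact absurd rfl h2
    | cons b Z2' =>
      simp only [List.all_eq_true, Bool.and_eq_true]
      constructor
      · intro h
        refine ⟨fun i hi => ((h i hi) b (by simp)).1, fun j hj => ?_⟩
        exact ((h a (by simp)) j hj).2
      · intro h i hi j hj
        exact ⟨h.1 i hi, h.2 j hj⟩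

-- ---- A's letter_check ----
theorem predA_iff (W : List Char) (k : Nat) (c : Char) :
    (PySem.Chars.isIn [c] (PySem.List.slice W (some ((0:Int) + k)) none) = true) ↔ c ∈ W.drop k := by
  have h0 : ((0:Int) + k) = ((k : Nat) : Int) := by ring
  rw [h0, PySem.List.slice_from_natCast, PySem.Chars.isIn_iff_infix]
  constructor
  · intro hinf
    exact List.singleton_sublist.mp hinf.sublist
  · intro hmem
    obtain ⟨s1, t1, hst⟩ := List.append_of_mem hmem
    exact ⟨s1, t1, by simp [hst]⟩

theorem a_letter_iff (L W : List Char) :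
    ((((PySem.List.enumerate L 0).filter
        (fun p => PySem.Chars.isIn [p.2] (PySem.List.slice W (some p.1) none))).map (·.2)) = L) ↔
      (∀ (k : Nat) (h : k < L.length), L[k] ∈ W.drop k) := by
  have hmapL : (PySem.List.enumerate L 0).map (·.2) = L := PySem.List.map_snd_enumerate L 0
  constructor
  · intro h
    have hsub := List.filter_sublist
      (l := PySem.List.enumerate L 0)
      (p := fun p => PySem.Chars.isIn [p.2] (PySem.List.slice W (some p.1) none))
    have hlen1 := congrArg List.length h
    simp only [List.length_map] at hlen1
    have hlen2 : ((PySem.List.enumerate L 0).filter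
        (fun p => PySem.Chars.isIn [p.2] (PySem.List.slice W (some p.1) none))).length
        = (PySem.List.enumerate L 0).length := by
      rw [hlen1, PySem.List.length_enumerate]
    have heq := hsub.eq_of_length hlen2
    intro k hk
    have hmem : ((0:Int) + k, L[k]) ∈ PySem.List.enumerate L 0 :=
      (PySem.List.mem_enumerate_iff _ _ _).mpr ⟨k, hk, rfl⟩
    have hp := List.filter_eq_self.mp heq _ hmem
    exact (predA_iff W k L[k]).mp hp
  · intro h
    have heq : ((PySem.List.enumerate L 0).filter
        (fun p => PySem.Chars.isIn [p.2] (PySem.List.slice W (some p.1) none)))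
        = PySem.List.enumerate L 0 := by
      apply List.filter_eq_self.mpr
      intro p hp
      obtain ⟨k, hk, rfl⟩ := (PySem.List.mem_enumerate_iff _ _ _).mp hp
      exact (predA_iff W k L[k]).mpr (h k hk)
    rw [heq, hmapL]

-- ---- B's last-occurrence dict ----
theorem lastD (W : List Char) (s : Int) (d : PySem.Dict Char Int) (c : Char) :
    (c ∉ W → ((PySem.List.enumerate W s).foldl (fun d p => d.insert p.2 p.1) d).getD c (-1)
        = d.getD c (-1)) ∧
    (c ∈ W → ∃ k : Nat, ∃ hk : k < W.length, W[k] = c ∧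
        (∀ j (hj : j < W.length), k < j → W[j] ≠ c) ∧
        ((PySem.List.enumerate W s).foldl (fun d p => d.insert p.2 p.1) d).getD c (-1) = s + k) := by
  induction W generalizing s d with
  | nil => simp [PySem.List.enumerate]
  | cons w W ih =>
    rw [PySem.List.enumerate_cons, List.foldl_cons]
    have IH := ih (s + 1) (d.insert w s)
    constructor
    · intro hc
      have hcW : c ∉ W := fun h => hc (List.mem_cons_of_mem _ h)
      have hcw : c ≠ w := fun h => hc (h ▸ List.mem_cons_self)
      rw [IH.1 hcW, PySem.Dict.getD_insert_of_ne _ _ _ hcw]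
    · intro hc
      by_cases hcW : c ∈ W
      · obtain ⟨k, hk, hWk, hlater, hval⟩ := IH.2 hcW
        refine ⟨k + 1, by simpa using Nat.succ_lt_succ hk, by simpa using hWk, ?_, ?_⟩
        · intro j hj hkj
          match j, hj with
          | j + 1, hj =>
            simp only [List.getElem_cons_succ]
            exact hlater j (by simpa using Nat.lt_of_succ_lt_succ hj) (by omega)
        · rw [hval]; push_cast; ring
      · have hcw : c = w := by
          rcases List.mem_cons.mp hc with h | h
          · exact h
          · exact absurd h hcW
        subst hcw
        refine ⟨0, by simp, by simp, ?_, ?_⟩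
        · intro j hj h0j
          match j, hj with
          | j + 1, hj =>
            simp only [List.getElem_cons_succ]
            intro hEq
            exact hcW (hEq ▸ List.getElem_mem _)
        · rw [IH.1 hcW, PySem.Dict.getD_insert_self]
          simp

theorem lastD_cond (W : List Char) (c : Char) (k : Nat) :
    (¬ (((PySem.List.enumerate W 0).foldl (fun d p => d.insert p.2 p.1)
          PySem.Dict.empty).getD c (-1) < (k : Int))) ↔ c ∈ W.drop k := by
  by_cases hc : c ∈ W
  · obtain ⟨m, hm, hWm, hlater, hval⟩ := (lastD W 0 PySem.Dict.empty c).2 hc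
    rw [hval]
    constructor
    · intro h
      have hkm : k ≤ m := by omega
      refine List.mem_iff_getElem.mpr ⟨m - k, by simp [List.length_drop]; omega, ?_⟩
      rw [List.getElem_drop]
      have : k + (m - k) = m := by omega
      simp [this, hWm]
    · intro h
      obtain ⟨j, hj, hWj⟩ := List.mem_iff_getElem.mp h
      rw [List.getElem_drop] at hWj
      have hjlt : k + j < W.length := by
        have h2 := hj
        simp only [List.length_drop] at h2
        omega
      by_cases hmj : m < k + j
      · exact absurd hWj (hlater (k + j) hjlt hmj)
      · intro hlt; omega
  · rw [(lastD W 0 PySem.Dict.empty c).1 hc, PySem.Dict.getD_empty]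
    constructor
    · intro h; exact absurd (by omega : (-1 : Int) < (k : Int)) h
    · intro h; exact absurd ((List.drop_sublist k W).mem h) hc

theorem altLetterLoop_eq_all (last : PySem.Dict Char Int) (ps : List (Int × Char)) :
    altLetterLoop last ps = ps.all (fun p => !decide (last.getD p.2 (-1) < p.1)) := by
  induction ps with
  | nil => rfl
  | cons p ps ih => by_cases h : last.getD p.2 (-1) < p.1 <;> simp [altLetterLoop, h, ih]

theorem b_letter_iff (L W : List Char) :
    (altLetterLoop ((PySem.List.enumerate W 0).foldl (fun d p => d.insert p.2 p.1)
        PySem.Dict.empty) (PySem.List.enumerate L 0) = true) ↔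
      (∀ (k : Nat) (h : k < L.length), L[k] ∈ W.drop k) := by
  rw [altLetterLoop_eq_all]
  simp only [List.all_eq_true]
  constructor
  · intro h k hk
    have hmem : ((0:Int) + k, L[k]) ∈ PySem.List.enumerate L 0 :=
      (PySem.List.mem_enumerate_iff _ _ _).mpr ⟨k, hk, rfl⟩
    have := h _ hmem
    simp only [Bool.not_eq_eq_eq_not, Bool.not_true, decide_eq_false_iff_not] at this
    exact (lastD_cond W L[k] k).mp (by simpa using this)
  · intro h p hp
    obtain ⟨k, hk, rfl⟩ := (PySem.List.mem_enumerate_iff _ _ _).mp hp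
    simp only [Bool.not_eq_eq_eq_not, Bool.not_true, decide_eq_false_iff_not]
    have := (lastD_cond W L[k] k).mpr (h k hk)
    simpa using this

-- ---- order side ----
theorem aOrderStep_mem (acc rem : List Char) (c : Char) (h : c ∈ rem) :
    aOrderStep (acc, rem) c = (acc ++ [c], rem.erase c) := by
  have hcont : rem.contains c = true := by simpa using h
  have hsome : (PySem.List.index? rem c).isSome := (PySem.List.index?_isSome_iff rem c).mpr h
  obtain ⟨k, hk⟩ : ∃ k, PySem.List.index? rem c = some k := by
    cases hidx : PySem.List.index? rem c with
    | none => rw [hidx] at hsome; simp at hsome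
    | some k => exact ⟨k, rfl⟩
  obtain ⟨pre, suf, hsplit, hlen, hpre⟩ := (PySem.List.index?_eq_some_iff rem c k).mp hk
  have hklt : k < rem.length := by
    subst hsplit; simp [← hlen]
  have hpop : PySem.List.pop? rem (k : Int) = some (rem[k], rem.eraseIdx k) :=
    PySem.List.pop?_natCast rem k hklt
  have herase : rem.eraseIdx k = rem.erase c := by
    subst hsplit
    rw [List.erase_append_right _ hpre, List.erase_cons_head]
    rw [List.eraseIdx_append]
    simp [← hlen]
  simp only [aOrderStep, hcont, if_true, hk, Option.getD_some, hpop, herase]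

theorem aOrderStep_not_mem (acc rem : List Char) (c : Char) (h : c ∉ rem) :
    aOrderStep (acc, rem) c = (acc, rem) := by
  simp [aOrderStep, h]

theorem aOrder_ext (W : List Char) : ∀ (st : List Char × List Char),
    ∃ ext, (W.foldl aOrderStep st).1 = st.1 ++ ext := by
  induction W with
  | nil => exact fun st => ⟨[], by simp⟩
  | cons c W ih =>
    intro st
    have hstep : (aOrderStep st c).1 = st.1 ∨ (aOrderStep st c).1 = st.1 ++ [c] := by
      by_cases h : c ∈ st.2
      · right
        obtain ⟨a, r⟩ := st
        rw [aOrderStep_mem a r c h]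
      · left
        obtain ⟨a, r⟩ := st
        rw [aOrderStep_not_mem a r c h]
    obtain ⟨ext, hext⟩ := ih (aOrderStep st c)
    rcases hstep with h | h
    · exact ⟨ext, by simp [List.foldl_cons, hext, h]⟩
    · exact ⟨[c] ++ ext, by simp [List.foldl_cons, hext, h]⟩

theorem ord (L : List Char) : ∀ (Wr acc rem : List Char) (cnt : PySem.Dict Char Int) (k : Nat),
    (∀ c, cnt.getD c 0 = (rem.count c : Int)) → acc = L.take k → k ≤ L.length →
    (altOrderLoop L Wr cnt k = true ↔ (Wr.foldl aOrderStep (acc, rem)).1 = L) := by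
  intro Wr
  induction Wr with
  | nil =>
    intro acc rem cnt k hcnt hacc hk
    subst hacc
    simp only [altOrderLoop, List.foldl_nil]
    constructor
    · intro h
      have hkk : k = L.length := by simpa using h
      simp [hkk]
    · intro h
      have hlen : (L.take k).length = L.length := by rw [h]
      simp only [List.length_take] at hlen
      have : k = L.length := by omega
      simp [this]
  | cons c Wr ih =>
    intro acc rem cnt k hcnt hacc hk
    have hlacc : acc.length = k := by
      subst hacc; simp [List.length_take]; omega
    by_cases hpos : cnt.getD c 0 > 0
    · have hmemc : c ∈ rem := by
        have h1 := hcnt c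
        rw [h1] at hpos
        exact List.count_pos_iff.mp (by exact_mod_cast hpos)
      rw [List.foldl_cons, aOrderStep_mem acc rem c hmemc]
      obtain ⟨ext, hext⟩ := aOrder_ext Wr (acc ++ [c], rem.erase c)
      by_cases hklt : k < L.length
      · by_cases hLk : L[k] = c
        · -- pointer advances
          have hget : PySem.List.pyGet? L (k : Int) = some c := by
            rw [PySem.List.pyGet?_natCast]
            simp [List.getElem?_eq_getElem hklt, hLk]
          have hcond : (decide (k ≥ L.length) || (PySem.List.pyGet? L (k : Int) != some c)) = false := by
            simp [hklt]; omega
          have hcnt' : ∀ c', (cnt.insert c (cnt.getD c 0 - 1)).getD c' 0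
              = ((rem.erase c).count c' : Int) := by
            intro c'
            by_cases hc' : c' = c
            · subst hc'
              rw [PySem.Dict.getD_insert_self, hcnt c', List.count_erase_self]
              have : 0 < rem.count c' := List.count_pos_iff.mpr hmemc
              omega
            · rw [PySem.Dict.getD_insert_of_ne _ _ _ hc', hcnt c', List.count_erase_of_ne hc']
          have hacc' : acc ++ [c] = L.take (k + 1) := by
            rw [List.take_add_one, ← hacc, List.getElem?_eq_getElem hklt, hLk]
            rfl
          have := ih (acc ++ [c]) (rem.erase c) (cnt.insert c (cnt.getD c 0 - 1)) (k + 1)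
            hcnt' hacc' (by omega)
          simpa only [altOrderLoop, hcond, if_pos hpos, Bool.false_eq_true, if_false] using this
        · -- mismatch: both sides false
          have hget : PySem.List.pyGet? L (k : Int) = some L[k] := by
            rw [PySem.List.pyGet?_natCast]
            simp [List.getElem?_eq_getElem hklt]
          have hcond : (decide (k ≥ L.length) || (PySem.List.pyGet? L (k : Int) != some c)) = true := by
            simp [hget, hLk]
          have hrhs : (Wr.foldl aOrderStep (acc ++ [c], rem.erase c)).1 ≠ L := by
            rw [hext]
            intro hEq
            apply hLk
            have : L[k] = (acc ++ ([c] ++ ext))[k]'(by rw [List.append_assoc] at hEq; rw [hEq]; exact hklt) := by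
              congr 1
              rw [← List.append_assoc, hEq]
            rw [this, List.getElem_append_right (by omega)]
            simp [hlacc]
          simp only [altOrderLoop, if_pos hpos, hcond, if_true]
          simp [hrhs]
      · -- k = L.length : pointer past end, both sides false
        have hcond : (decide (k ≥ L.length) || (PySem.List.pyGet? L (k : Int) != some c)) = true := by
          simp; omega
        have hrhs : (Wr.foldl aOrderStep (acc ++ [c], rem.erase c)).1 ≠ L := by
          rw [hext]
          intro hEq
          have : (acc ++ [c] ++ ext).length = L.length := by rw [hEq]
          simp at this
          omega
        simp only [altOrderLoop, if_pos hpos, hcond, if_true]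
        simp [hrhs]
    · -- letter not available: both sides skip
      have hcc : rem.count c = 0 := by
        have h1 := hcnt c
        omega
      have hmem : c ∉ rem := List.count_eq_zero.mp hcc
      rw [List.foldl_cons, aOrderStep_not_mem acc rem c hmem]
      have := ih acc rem cnt k hcnt hacc hk
      simpa only [altOrderLoop, if_neg hpos] using this

theorem cnt0_spec (L : List Char) (c : Char) :
    (L.foldl (fun d c => d.insert c (d.getD c 0 + 1)) PySem.Dict.empty).getD c 0
      = (L.count c : Int) := by
  rw [PySem.Dict.getD_foldl_insert_add_one]
  simp

theorem foldl_rem_nil (W : List Char) : ∀ acc, W.foldl aOrderStep (acc, []) = (acc, []) := by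
  induction W with
  | nil => intro acc; rfl
  | cons c W ih =>
    intro acc
    rw [List.foldl_cons, aOrderStep_not_mem acc [] c (by simp)]
    exact ih acc

theorem main_lemma : ∀ (input_ word : String), can_complete input_ word = can_complete_alt input_ word := by
  intro i w
  rw [Bool.eq_iff_iff]
  simp only [can_complete, can_complete_alt, Bool.and_eq_true]
  generalize i.toList = L
  generalize w.toList = W
  rw [b_letter_iff L W,
    ord L W [] L (L.foldl (fun d c => d.insert c (d.getD c 0 + 1)) PySem.Dict.empty) 0
      (fun c => cnt0_spec L c) (by simp) (by simp)]
  cases L with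
  | nil =>
    rw [foldl_rem_nil W []]
    simp [PySem.List.enumerate, zipLongest]
  | cons x L' =>
    rw [prodAll _ _ (zl_ne_nil _ _ (by simp)) (zl_ne_nil _ _ (by simp)), zl_all, zl_all]
    constructor
    · intro ⟨h1, h2⟩
      exact ⟨(a_letter_iff (x :: L') W).mp h1.symm, h2.symm⟩
    · intro ⟨h1, h2⟩
      exact ⟨((a_letter_iff (x :: L') W).mpr h1).symm, h2.symm⟩

-- ===== VERDICT (by name: the statement is the Claim_ definition above) =====
theorem can_complete_spec : Claim_equal_can_complete := by
  intro i w _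
  unfold Spec_can_complete
  exact main_lemma i w
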